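-- pv_equiv track=rewrite | github.com/andrewzamai/MSEQA_4_NER | SOTA_MODELS/GNER/data_handler_for_GNER.py | split_into_sentence_chunks
-- ===== SOURCE A (Python) =====
-- def split_into_sentence_chunks(tokens, labels):
--     """ splits each BUSTER documents in sentences according to '.' """
--     chunks = []
--     current_sentence_tokens = []
--     current_sentence_labels = []
--
--     for tok, label in zip(tokens, labels):
--         if tok != ".":
--             current_sentence_tokens.append(tok)
--             current_sentence_labels.append(label)
--         else:
--             chunks.append({"chunk_tokens": current_sentence_tokens, "chunk_labels": current_sentence_labels})
--             current_sentence_tokens = []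
--             current_sentence_labels = []
--
--     if current_sentence_tokens:
--         chunks.append({"chunk_tokens": current_sentence_tokens, "chunk_labels": current_sentence_labels})
--
--     return chunks
-- ===== SOURCE B (Python) =====
-- def split_into_sentence_chunks(tokens, labels):
--     """Find-and-split: repeatedly locate the next '.' and slice off one sentence."""
--     n = min(len(tokens), len(labels))
--     tokens = tokens[:n]
--     labels = labels[:n]
--     chunks = []
--     while "." in tokens:
--         i = tokens.index(".")
--         chunks.append({"chunk_tokens": tokens[:i], "chunk_labels": labels[:i]})
--         tokens = tokens[i + 1:]
--         labels = labels[i + 1:]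
--     if tokens:
--         chunks.append({"chunk_tokens": tokens, "chunk_labels": labels})
--     return chunks
-- ===== Notes on version B (the rewrite author's own statement) =====
-- stated objective: alternative
-- what changed: Replaces the element-by-element accumulation over zip(tokens, labels) with a find-and-split pass: truncate both lists to the common length, then repeatedly locate the next '.' and slice off one sentence chunk, emitting the trailing slice only if non-empty.
import Mathlib
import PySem

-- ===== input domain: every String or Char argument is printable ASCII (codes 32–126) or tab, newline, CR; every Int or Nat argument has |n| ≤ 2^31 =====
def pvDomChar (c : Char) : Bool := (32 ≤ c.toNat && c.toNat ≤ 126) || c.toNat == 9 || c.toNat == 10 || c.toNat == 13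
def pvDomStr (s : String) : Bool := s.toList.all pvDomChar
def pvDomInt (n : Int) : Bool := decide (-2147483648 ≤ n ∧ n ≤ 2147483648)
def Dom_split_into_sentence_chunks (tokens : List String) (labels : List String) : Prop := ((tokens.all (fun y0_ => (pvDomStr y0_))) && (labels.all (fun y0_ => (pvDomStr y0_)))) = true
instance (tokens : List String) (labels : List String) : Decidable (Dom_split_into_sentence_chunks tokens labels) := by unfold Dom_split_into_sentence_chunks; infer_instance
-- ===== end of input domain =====

-- B replaces A's element-by-element accumulation with a find-the-next-period-and-slice pass (objective: alternative decomposition, same cost).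

-- ===== PORT A =====
-- the loop body of A's 'for tok, label in zip(tokens, labels)'
def pvAStep (st : List (List (String × List String)) × List String × List String)
    (p : String × String) : List (List (String × List String)) × List String × List String :=
  if p.1 ≠ "." then (st.1, st.2.1 ++ [p.1], st.2.2 ++ [p.2])
  else (st.1 ++ [[("chunk_tokens", st.2.1), ("chunk_labels", st.2.2)]], [], [])

def split_into_sentence_chunks (tokens : List String) (labels : List String) : List (List (String × List String)) :=
  let r := (tokens.zip labels).foldl pvAStep ([], [], [])
  if r.2.1 ≠ [] then r.1 ++ [[("chunk_tokens", r.2.1), ("chunk_labels", r.2.2)]] else r.1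

-- ===== PORT B =====
-- B's 'while "." in tokens: i = tokens.index("."); …'
def pvBLoop (toks labs : List String) : List (List (String × List String)) :=
  if hm : "." ∈ toks then
    let i := toks.idxOf "."
    [("chunk_tokens", toks.take i), ("chunk_labels", labs.take i)] ::
      pvBLoop (toks.drop (i + 1)) (labs.drop (i + 1))
  else if toks ≠ [] then [[("chunk_tokens", toks), ("chunk_labels", labs)]] else []
termination_by toks.length
decreasing_by
  have := List.idxOf_lt_length_of_mem hm
  simp [List.length_drop]; omega

def split_into_sentence_chunks_alt (tokens : List String) (labels : List String) : List (List (String × List String)) :=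
  let n := min tokens.length labels.length
  pvBLoop (tokens.take n) (labels.take n)

-- ===== PRECONDITION & SPEC =====
def Spec_split_into_sentence_chunks (tokens : List String) (labels : List String) (out : List (List (String × List String))) : Prop := out = split_into_sentence_chunks_alt tokens labels
instance (tokens : List String) (labels : List String) (out : List (List (String × List String))) : Decidable (Spec_split_into_sentence_chunks tokens labels out) := by unfold Spec_split_into_sentence_chunks; infer_instance

-- ===== CLAIM (what is proved, stated in full; the proofs are below) =====
def Claim_equal_split_into_sentence_chunks : Prop := ∀ (tokens : List String) (labels : List String), Dom_split_into_sentence_chunks tokens labels → Spec_split_into_sentence_chunks tokens labels (split_into_sentence_chunks tokens labels)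

-- ===== LEMMAS AND PROOFS =====

-- recursive characterisation of A's fold state
def chunksRec : List (String × String) → List String → List String →
    List (List (String × List String)) × List String × List String
  | [], t, l => ([], t, l)
  | p :: rest, t, l =>
    if p.1 ≠ "." then chunksRec rest (t ++ [p.1]) (l ++ [p.2])
    else
      let r := chunksRec rest [] []
      ([("chunk_tokens", t), ("chunk_labels", l)] :: r.1, r.2)

def pvFinish (r : List (List (String × List String)) × List String × List String) :
    List (List (String × List String)) :=
  if r.2.1 ≠ [] then r.1 ++ [[("chunk_tokens", r.2.1), ("chunk_labels", r.2.2)]] else r.1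

theorem foldA_eq (ps : List (String × String)) :
    ∀ (c : List (List (String × List String))) (t l : List String),
    ps.foldl pvAStep (c, t, l) = (c ++ (chunksRec ps t l).1, (chunksRec ps t l).2) := by
  induction ps with
  | nil => intro c t l; simp [chunksRec]
  | cons p rest ih =>
    intro c t l
    by_cases hp : p.1 = "."
    · simp [List.foldl, pvAStep, chunksRec, hp, ih]
    · simp [List.foldl, pvAStep, chunksRec, hp, ih]

theorem chunksRec_nodot_append (seg : List (String × String)) :
    ∀ (rest : List (String × String)) (t l : List String),
    (∀ p ∈ seg, p.1 ≠ ".") →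
    chunksRec (seg ++ rest) t l = chunksRec rest (t ++ seg.map Prod.fst) (l ++ seg.map Prod.snd) := by
  induction seg with
  | nil => intro rest t l _; simp
  | cons p seg' ih =>
    intro rest t l h
    have hp : p.1 ≠ "." := h p (by simp)
    simp only [List.cons_append, chunksRec, if_pos hp]
    rw [ih rest _ _ (fun q hq => h q (by simp [hq]))]
    simp

theorem pvFinish_cons (x : List (String × List String))
    (cs : List (List (String × List String))) (t l : List String) :
    pvFinish (x :: cs, t, l) = x :: pvFinish (cs, t, l) := by
  by_cases ht : t = [] <;> simp [pvFinish, ht]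


theorem not_dot_mem_take_idxOf : ∀ (toks : List String), "." ∉ toks.take (toks.idxOf ".") := by
  intro toks
  induction toks with
  | nil => simp
  | cons x xs ih =>
    by_cases hx : x = "."
    · simp [hx]
    · simp only [List.idxOf_cons]
      rw [beq_eq_false_iff_ne.mpr hx]
      simp only [cond_false, List.take_succ_cons, List.mem_cons, not_or]
      exact ⟨fun h => hx h.symm, ih⟩

theorem zip_take_min (l : List String) : ∀ l' : List String,
    (l.take (min l.length l'.length)).zip (l'.take (min l.length l'.length)) = l.zip l' := by
  induction l with
  | nil => intro l'; simp
  | cons x xs ih =>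
    intro l'
    cases l' with
    | nil => simp
    | cons y ys => simp [Nat.succ_min_succ, ih]

theorem pvBLoop_eq (n : Nat) : ∀ toks labs : List String, toks.length = n →
    toks.length = labs.length →
    pvBLoop toks labs = pvFinish (chunksRec (toks.zip labs) [] []) := by
  induction n using Nat.strong_induction_on with
  | _ n ih =>
    intro toks labs hn hlen
    by_cases hm : "." ∈ toks
    · have hi : toks.idxOf "." < toks.length := List.idxOf_lt_length_of_mem hm
      have hil : toks.idxOf "." < labs.length := hlen ▸ hi
      set i := toks.idxOf "." with hidef
      have htd : toks = toks.take i ++ "." :: toks.drop (i + 1) := by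
        conv_lhs => rw [← List.take_append_drop i toks]
        rw [← List.getElem_cons_drop hi, List.getElem_idxOf hi]
      have hld : labs = labs.take i ++ labs[i] :: labs.drop (i + 1) := by
        conv_lhs => rw [← List.take_append_drop i labs]
        rw [← List.getElem_cons_drop hil]
      have hlt : (toks.take i).length = (labs.take i).length := by
        simp; omega
      have hzip : toks.zip labs =
          (toks.take i).zip (labs.take i) ++
            (".", labs[i]) :: (toks.drop (i + 1)).zip (labs.drop (i + 1)) := by
        conv_lhs => rw [htd, hld]
        rw [List.zip_append hlt]
        rfl
      have hseg : ∀ p ∈ (toks.take i).zip (labs.take i), p.1 ≠ "." := by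
        intro p hp hpe
        have := (List.of_mem_zip hp).1
        rw [hpe] at this
        exact not_dot_mem_take_idxOf toks this
      have hmf : ((toks.take i).zip (labs.take i)).map Prod.fst = toks.take i :=
        List.map_fst_zip (le_of_eq hlt)
      have hms : ((toks.take i).zip (labs.take i)).map Prod.snd = labs.take i :=
        List.map_snd_zip (ge_of_eq hlt)
      rw [pvBLoop, dif_pos hm, hzip, chunksRec_nodot_append _ _ _ _ hseg]
      simp only [List.nil_append, hmf, hms, chunksRec, ne_eq, not_true_eq_false, if_false]
      rw [pvFinish_cons]
      have hdl : (toks.drop (i + 1)).length = (labs.drop (i + 1)).length := by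
        simp; omega
      rw [ih (toks.drop (i + 1)).length (by simp; omega) _ _ rfl hdl]
    · rw [pvBLoop, dif_neg hm]
      have hseg : ∀ p ∈ toks.zip labs, p.1 ≠ "." := by
        intro p hp hpe
        have := (List.of_mem_zip hp).1
        rw [hpe] at this
        exact hm this
      have := chunksRec_nodot_append (toks.zip labs) [] [] [] hseg
      simp only [List.append_nil] at this
      rw [this]
      simp only [chunksRec, List.nil_append]
      rw [List.map_fst_zip (le_of_eq hlen), List.map_snd_zip (ge_of_eq hlen)]
      by_cases ht : toks = []
      · subst ht
        have : labs = [] := List.eq_nil_of_length_eq_zero (by simpa using hlen.symm)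
        subst this
        simp [pvFinish]
      · simp [pvFinish, ht]

-- ===== VERDICT (by name: the statement is the Claim_ definition above) =====
theorem split_into_sentence_chunks_spec : Claim_equal_split_into_sentence_chunks := by
  intro tokens labels _
  unfold Spec_split_into_sentence_chunks split_into_sentence_chunks split_into_sentence_chunks_alt
  rw [foldA_eq]
  show pvFinish _ = _
  simp only [List.nil_append]
  rw [pvBLoop_eq (tokens.take (min tokens.length labels.length)).length _ _ rfl
        (by simp), zip_take_min]
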